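-- pv_equiv track=rewrite | github.com/kSahatova/xAI-PPM | ppm/datasets/labeling.py | verify_bpi15_ltl_rule
-- ===== SOURCE A (Python) =====
-- from typing import List
--
-- def verify_bpi15_ltl_rule(trace: List[str]):
--     """
--     Checks the rule: G(send_receipt -> F(retrieve_data))
--     Returns True if the trace satisfies the rule, False otherwise.
--     """
--     # 1. Find all indices where the 'trigger' occurs
--     trigger = "send confirmation receipt"
--     target = "retrieve missing data"
--
--     # Get positions of all trigger events
--     trigger_indices = [i for i, event in enumerate(trace) if event == trigger]
--
--     # 2. For every trigger found, check if the target exists later in the trace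
--     for idx in trigger_indices:
--         # Look at the slice of the trace starting from this event to the end
--         future_events = trace[idx:]
--
--         # Check if any event in the future matches the target
--         target_found = any(event == target for event in future_events)
--
--         if not target_found:
--             # If even one trigger lacks an eventual target, the 'Global' rule fails
--             return 0
--
--     # If we never returned False, the rule is satisfied (or the trigger never occurred)
--     return 1
-- ===== SOURCE B (Python) =====
-- from typing import List
--
-- def verify_bpi15_ltl_rule(trace: List[str]):
--     """Single reverse pass: scanning from the end, remember whether a target
--     has been seen; any trigger met before a target falsifies the rule."""
--     trigger = "send confirmation receipt"
--     target = "retrieve missing data"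
--     seen_target = False
--     for event in reversed(trace):
--         if event == target:
--             seen_target = True
--         elif event == trigger and not seen_target:
--             return 0
--     return 1
-- ===== Notes on version B (the rewrite author's own statement) =====
-- stated objective: alternative
-- what changed: Replaced the index-list plus per-trigger forward slice scan by one reverse pass that keeps a single 'target seen' flag and fails on the first trigger met before any target.
import Mathlib
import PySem

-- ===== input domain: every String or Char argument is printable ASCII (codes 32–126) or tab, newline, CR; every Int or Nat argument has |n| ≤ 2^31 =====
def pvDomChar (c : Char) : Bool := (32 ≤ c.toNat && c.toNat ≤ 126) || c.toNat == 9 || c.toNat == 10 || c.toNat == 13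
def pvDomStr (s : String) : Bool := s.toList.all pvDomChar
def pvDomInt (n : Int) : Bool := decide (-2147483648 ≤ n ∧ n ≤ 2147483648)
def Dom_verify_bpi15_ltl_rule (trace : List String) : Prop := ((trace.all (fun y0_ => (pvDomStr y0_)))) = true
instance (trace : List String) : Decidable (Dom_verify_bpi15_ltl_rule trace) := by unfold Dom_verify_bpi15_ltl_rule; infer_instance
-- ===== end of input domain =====

-- B replaces A's per-trigger forward slice scan by one reverse pass with a 'target seen' flag (proved equal on all inputs).

-- ===== PORT A =====
-- the 'for idx in trigger_indices: … return 0 …' loop of A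
def pvLoopA (trace : List String) : List Int → Int
  | [] => 1
  | idx :: rest =>
    let future := PySem.List.slice trace (some idx) none     -- trace[idx:]
    let target_found := future.any (fun event => event == "retrieve missing data")
    if !target_found then 0 else pvLoopA trace rest

def verify_bpi15_ltl_rule (trace : List String) : Int :=
  let trigger_indices :=
    ((PySem.List.enumerate trace 0).filter
      (fun p => p.2 == "send confirmation receipt")).map (·.1)
  pvLoopA trace trigger_indices

-- ===== PORT B =====
-- the 'for event in reversed(trace)' loop of B, carrying the seen_target flag
def pvGoB : List String → Bool → Int
  | [], _ => 1
  | event :: rest, seen_target =>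
    if event == "retrieve missing data" then pvGoB rest true
    else if event == "send confirmation receipt" && !seen_target then 0
    else pvGoB rest seen_target

def verify_bpi15_ltl_rule_alt (trace : List String) : Int :=
  pvGoB trace.reverse false

-- ===== PRECONDITION & SPEC =====
def Spec_verify_bpi15_ltl_rule (trace : List String) (out : Int) : Prop := out = verify_bpi15_ltl_rule_alt trace
instance (trace : List String) (out : Int) : Decidable (Spec_verify_bpi15_ltl_rule trace out) := by unfold Spec_verify_bpi15_ltl_rule; infer_instance

-- ===== CLAIM (what is proved, stated in full; the proofs are below) =====
def Claim_equal_verify_bpi15_ltl_rule : Prop := ∀ (trace : List String), Dom_verify_bpi15_ltl_rule trace → Spec_verify_bpi15_ltl_rule trace (verify_bpi15_ltl_rule trace)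

-- ===== LEMMAS AND PROOFS =====

-- indices produced by enumerate at start s are ≥ s
lemma pv_idx_ge (xs : List String) (P : Int × String → Bool) :
    ∀ s : Int, ∀ i ∈ ((PySem.List.enumerate xs s).filter P).map (·.1), s ≤ i := by
  induction xs with
  | nil => intro s i h; simp [PySem.List.enumerate_nil] at h
  | cons x xs ih =>
    intro s i h
    rw [PySem.List.enumerate_cons] at h
    simp only [List.filter_cons] at h
    by_cases hp : P (s, x) = true
    · rw [if_pos hp] at h
      simp only [List.map_cons, List.mem_cons] at h
      rcases h with h | h
      · omega
      · have := ih (s + 1) i h; omega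
    · rw [if_neg hp] at h
      have := ih (s + 1) i h; omega

-- shifting the start of enumerate shifts every produced index by 1
lemma pv_idx_shift (xs : List String) (P : String → Bool) :
    ∀ s : Int,
      ((PySem.List.enumerate xs (s + 1)).filter (fun p => P p.2)).map (·.1)
        = (((PySem.List.enumerate xs s).filter (fun p => P p.2)).map (·.1)).map (· + 1) := by
  induction xs with
  | nil => intro s; simp [PySem.List.enumerate_nil]
  | cons x xs ih =>
    intro s
    rw [PySem.List.enumerate_cons, PySem.List.enumerate_cons]
    simp only [List.filter_cons]
    by_cases hp : P x = true
    · simp only [hp, if_pos, List.map_cons, ih (s + 1)]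
    · simp only [hp, Bool.false_eq_true, if_false, ih (s + 1)]

-- the loop of A over shifted indices on x :: xs equals the loop over the original indices on xs
lemma pv_loopA_shift (x : String) (xs : List String) (l : List Int) (h : ∀ i ∈ l, 0 ≤ i) :
    pvLoopA (x :: xs) (l.map (· + 1)) = pvLoopA xs l := by
  induction l with
  | nil => rfl
  | cons i rest ih =>
    have hi : 0 ≤ i := h i (by simp)
    have hs : PySem.List.slice (x :: xs) (some (i + 1)) none = PySem.List.slice xs (some i) none := by
      rw [PySem.List.slice_from _ (by omega), PySem.List.slice_from _ hi]
      have : (i + 1).toNat = i.toNat + 1 := by omega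
      rw [this, List.drop_succ_cons]
    simp only [List.map_cons, pvLoopA, hs]
    split
    · rfl
    · exact ih (fun j hj => h j (by simp [hj]))

-- one step of A from the front
lemma pv_A_cons (x : String) (xs : List String) :
    verify_bpi15_ltl_rule (x :: xs)
      = if x == "send confirmation receipt" && !(xs.any (fun e => e == "retrieve missing data"))
        then 0 else verify_bpi15_ltl_rule xs := by
  unfold verify_bpi15_ltl_rule
  rw [PySem.List.enumerate_cons]
  simp only [List.filter_cons]
  have hshift := pv_idx_shift xs (fun e => e == "send confirmation receipt") 0
  have hge := pv_idx_ge xs (fun p => p.2 == "send confirmation receipt") 0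
  by_cases hx : x = "send confirmation receipt"
  · subst hx
    simp only [beq_self_eq_true, if_pos, List.map_cons, hshift]
    simp only [pvLoopA, PySem.List.slice_from _ (le_refl (0 : Int))]
    simp only [Int.toNat_zero, List.drop_zero, List.any_cons]
    rw [pv_loopA_shift _ xs _ hge]
    by_cases ha : (xs.any (fun e => e == "retrieve missing data")) = true
    · simp [ha]
    · simp only [Bool.not_eq_true] at ha
      simp [ha]
  · have hxb : (x == "send confirmation receipt") = false := by simp [hx]
    simp only [hxb, Bool.false_eq_true, if_false, Bool.false_and]
    rw [hshift, pv_loopA_shift x xs _ hge]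

-- pvGoB only returns 0 or 1
lemma pv_goB_range (l : List String) (seen : Bool) : pvGoB l seen = 0 ∨ pvGoB l seen = 1 := by
  induction l generalizing seen with
  | nil => right; rfl
  | cons e rest ih =>
    simp only [pvGoB]
    split
    · exact ih true
    · split
      · left; rfl
      · exact ih seen

-- one step of B from the back
lemma pv_goB_append (l : List String) (x : String) (seen : Bool) :
    pvGoB (l ++ [x]) seen
      = if pvGoB l seen = 0 then 0
        else if x == "retrieve missing data" then 1
        else if x == "send confirmation receipt" && !(seen || l.any (fun e => e == "retrieve missing data")) then 0
        else 1 := by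
  induction l generalizing seen with
  | nil =>
    simp only [List.nil_append, pvGoB, List.any_nil, Bool.or_false]
    split
    · simp
    · split
      · simp
      · simp
  | cons e rest ih =>
    simp only [List.cons_append, pvGoB, List.any_cons]
    by_cases he : e = "retrieve missing data"
    · subst he
      simp only [beq_self_eq_true, if_pos, ih true, Bool.true_or, Bool.or_true]
    · have heb : (e == "retrieve missing data") = false := by simp [he]
      simp only [heb, Bool.false_eq_true, if_false, Bool.false_or]
      split
      · simp
      · rw [ih seen]

lemma pv_main (trace : List String) :
    verify_bpi15_ltl_rule trace = verify_bpi15_ltl_rule_alt trace := by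
  induction trace with
  | nil => rfl
  | cons x xs ih =>
    rw [pv_A_cons]
    unfold verify_bpi15_ltl_rule_alt at ih ⊢
    rw [List.reverse_cons, pv_goB_append, List.any_reverse, Bool.false_or, ← ih]
    rcases pv_goB_range xs.reverse false with h | h <;> rw [← ih] at h <;> rw [h]
    · split <;> simp
    · have h1 : (1 : Int) ≠ 0 := by decide
      rw [if_neg h1]
      by_cases hx : x = "retrieve missing data"
      · subst hx
        have : ("retrieve missing data" == "send confirmation receipt") = false := by decide
        simp [this]
      · have hxb : (x == "retrieve missing data") = false := by simp [hx]
        simp only [hxb, Bool.false_eq_true, if_false]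

-- ===== VERDICT (by name: the statement is the Claim_ definition above) =====
theorem verify_bpi15_ltl_rule_spec : Claim_equal_verify_bpi15_ltl_rule := by
  intro trace _
  unfold Spec_verify_bpi15_ltl_rule
  exact pv_main trace
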